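-- pv_equiv track=rewrite | github.com/Endote/clustering_research_papers | normalize_authors_both.py | build_abbreviation_mapping
-- ===== SOURCE A (Python) =====
-- def build_abbreviation_mapping(id_list):
--     """Handle abbreviated names like 'Lastname A' -> 'Firstname Lastname'."""
--     abbrev_map = {}
--     for name in id_list:
--         tokens = name.split()
--         if len(tokens) == 2 and len(tokens[1]) == 1:
--             last, initial = tokens
--             for full in id_list:
--                 full_tokens = full.split()
--                 if len(full_tokens) >= 2 and last == full_tokens[-1] and full_tokens[0].startswith(initial):
--                     abbrev_map[name] = full
--     return abbrev_map
-- ===== SOURCE B (Python) =====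
-- def build_abbreviation_mapping(id_list):
--     """Handle abbreviated names like 'Lastname A' -> 'Firstname Lastname'."""
--     index = {}
--     for full in id_list:
--         ft = full.split()
--         if len(ft) >= 2:
--             index[(ft[-1], ft[0][:1])] = full
--     result = {}
--     for name in id_list:
--         tokens = name.split()
--         if len(tokens) == 2 and len(tokens[1]) == 1:
--             full = index.get((tokens[0], tokens[1]))
--             if full is not None:
--                 result[name] = full
--     return result
-- ===== Notes on version B (the rewrite author's own statement) =====
-- stated objective: alternative
-- what changed: Replaces the nested rescan of id_list for every abbreviated name by a single pre-built dict keyed on (last token, first character) with last-wins overwrite, so each abbreviated name is resolved by one lookup instead of an inner scan.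
import Mathlib
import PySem

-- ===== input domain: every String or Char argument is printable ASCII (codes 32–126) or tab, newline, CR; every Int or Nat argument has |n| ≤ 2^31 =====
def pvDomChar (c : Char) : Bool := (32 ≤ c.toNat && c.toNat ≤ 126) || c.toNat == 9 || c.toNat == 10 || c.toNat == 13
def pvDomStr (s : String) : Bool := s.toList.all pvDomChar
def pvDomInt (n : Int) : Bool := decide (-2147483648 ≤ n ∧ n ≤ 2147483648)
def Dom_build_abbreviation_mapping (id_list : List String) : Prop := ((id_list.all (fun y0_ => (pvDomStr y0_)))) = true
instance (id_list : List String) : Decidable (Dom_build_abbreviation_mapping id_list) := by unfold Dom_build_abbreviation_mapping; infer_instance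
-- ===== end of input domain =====

-- B replaces A's nested rescan of id_list by one pre-built index dict keyed on
-- (last token, first character), looked up once per abbreviated name (objective: alternative).

-- ===== PORT A =====
-- literal transliteration of A: outer loop over names, inner rescan of id_list,
-- dict insert on every match (last match wins)
def build_abbreviation_mapping (id_list : List String) : List (String × String) :=
  (id_list.foldl (fun abbrev_map name =>
    let tokens := PySem.Str.split₀ name
    if tokens.length == 2 && PySem.Str.len (tokens.getD 1 "") == 1 then
      let last := tokens.getD 0 ""
      let initial := tokens.getD 1 ""
      id_list.foldl (fun abbrev_map full =>
        let full_tokens := PySem.Str.split₀ full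
        if decide (2 ≤ full_tokens.length)
            && (last == full_tokens.getLastD "")      -- full_tokens[-1], guarded by len ≥ 2
            && PySem.Str.startswith (full_tokens.getD 0 "") initial  -- full_tokens[0], guarded
        then abbrev_map.insert name full else abbrev_map) abbrev_map
    else abbrev_map) (PySem.Dict.empty : PySem.Dict String String)).items

-- ===== PORT B =====
-- literal transliteration of Source B: first pass builds the index, second pass looks up
def build_abbreviation_mapping_alt (id_list : List String) : List (String × String) :=
  let index := id_list.foldl (fun index full =>
    let ft := PySem.Str.split₀ full
    if 2 ≤ ft.length
    then index.insert (ft.getLastD "", PySem.Str.slice (ft.getD 0 "") none (some 1)) full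
    else index) (PySem.Dict.empty : PySem.Dict (String × String) String)
  (id_list.foldl (fun result name =>
    let tokens := PySem.Str.split₀ name
    if tokens.length == 2 && PySem.Str.len (tokens.getD 1 "") == 1 then
      match index.get? (tokens.getD 0 "", tokens.getD 1 "") with
      | some full => result.insert name full
      | none => result
    else result) (PySem.Dict.empty : PySem.Dict String String)).items

-- ===== PRECONDITION & SPEC =====
def Spec_build_abbreviation_mapping (id_list : List String) (out : List (String × String)) : Prop := out = build_abbreviation_mapping_alt id_list
instance (id_list : List String) (out : List (String × String)) : Decidable (Spec_build_abbreviation_mapping id_list out) := by unfold Spec_build_abbreviation_mapping; infer_instance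

-- ===== CLAIM (what is proved, stated in full; the proofs are below) =====
def Claim_equal_build_abbreviation_mapping : Prop := ∀ (id_list : List String), Dom_build_abbreviation_mapping id_list → Spec_build_abbreviation_mapping id_list (build_abbreviation_mapping id_list)

-- ===== LEMMAS AND PROOFS =====

-- A's inner loop: repeated insert at the one key `name` keeps only the LAST matching full
theorem foldl_insert_if_eq_getLast_filter (l : List String) (p : String → Bool)
    (k : String) (m : PySem.Dict String String) :
    l.foldl (fun m full => if p full then m.insert k full else m) m =
      match (l.filter p).getLast? with
      | some v => m.insert k v
      | none => m := by
  induction l generalizing m with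
  | nil => simp
  | cons a l ih =>
    simp only [List.foldl_cons, List.filter_cons]
    by_cases hpa : p a = true
    · simp only [hpa, if_true]
      rw [ih, List.getLast?_cons]
      cases hfl : (l.filter p).getLast? <;>
        simp [PySem.Dict.insert_insert_self]
    · simp only [hpa, Bool.false_eq_true, if_false]
      rw [ih]

-- B's index: lookup in the index built by the first pass is the LAST full with that key
theorem get?_foldl_insert_key (l : List String) (q : String → Prop) [DecidablePred q]
    (key : String → String × String) (k : String × String)
    (ix : PySem.Dict (String × String) String) :
    (l.foldl (fun ix full => if q full then ix.insert (key full) full else ix) ix).get? k =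
      match (l.filter (fun full => decide (q full) && key full == k)).getLast? with
      | some v => some v
      | none => ix.get? k := by
  induction l generalizing ix with
  | nil => simp
  | cons a l ih =>
    simp only [List.foldl_cons, List.filter_cons]
    by_cases hqa : q a
    · by_cases hk : key a = k
      · have hc : (decide (q a) && key a == k) = true := by simp [hqa, hk]
        simp only [if_pos hqa, hc]
        rw [ih]
        cases hfl : (l.filter (fun full => decide (q full) && key full == k)).getLast? <;>
          simp [hfl, List.getLast?_cons, hk]
      · have hc : (decide (q a) && key a == k) = false := by simp [hk]
        simp only [if_pos hqa, hc, Bool.false_eq_true, if_false]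
        rw [ih]
        cases hfl : (l.filter (fun full => decide (q full) && key full == k)).getLast? <;>
          simp [PySem.Dict.get?_insert, Ne.symm hk]
    · have hc : (decide (q a) && key a == k) = false := by simp [hqa]
      simp only [if_neg hqa, hc, Bool.false_eq_true, if_false]
      rw [ih]

-- startswith against a 1-character string is a first-character slice comparison
theorem startswith_eq_slice_one (s p : String) (hp : p.toList.length = 1) :
    PySem.Str.startswith s p = (PySem.Str.slice s none (some 1) == p) := by
  rw [Bool.eq_iff_iff, beq_iff_eq, ← String.toList_inj,
    PySem.Str.startswith_eq, PySem.Chars.startswith_iff, PySem.Str.toList_slice,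
    PySem.Chars.slice_eq_listSlice, PySem.List.slice_to _ (by norm_num : (0:Int) ≤ 1)]
  rw [List.prefix_iff_eq_take, hp]
  norm_num [eq_comm]

-- the two match predicates agree once the abbreviation has a 1-character initial
theorem pred_eq (last initial full : String) (hi : (PySem.Str.len initial == 1) = true) :
    (decide (2 ≤ (PySem.Str.split₀ full).length)
        && (last == (PySem.Str.split₀ full).getLastD "")
        && PySem.Str.startswith ((PySem.Str.split₀ full).getD 0 "") initial) =
    (decide (2 ≤ (PySem.Str.split₀ full).length)
      && (((PySem.Str.split₀ full).getLastD "",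
          PySem.Str.slice ((PySem.Str.split₀ full).getD 0 "") none (some 1))
            == (last, initial))) := by
  have hlen : initial.toList.length = 1 := by
    have h : ((initial.toList.length : Int)) = 1 := by
      simpa [PySem.Str.len_eq] using hi
    omega
  simp only [startswith_eq_slice_one _ _ hlen]
  by_cases h2 : 2 ≤ (PySem.Str.split₀ full).length
  · simp only [h2, decide_true, Bool.true_and]
    rw [Bool.eq_iff_iff]
    simp only [Bool.and_eq_true, beq_iff_eq, Prod.mk.injEq]
    constructor <;> (rintro ⟨ha, hb⟩; exact ⟨ha.symm, hb⟩)
  · simp [h2]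

-- ===== VERDICT (by name: the statement is the Claim_ definition above) =====
theorem build_abbreviation_mapping_spec : Claim_equal_build_abbreviation_mapping := by
  intro id_list _hdom
  unfold Spec_build_abbreviation_mapping
  unfold build_abbreviation_mapping build_abbreviation_mapping_alt
  simp only []
  congr 1
  apply PySem.List.foldl_congr_mem
  intro m name _hmem
  by_cases hcond : ((PySem.Str.split₀ name).length == 2
      && PySem.Str.len ((PySem.Str.split₀ name).getD 1 "") == 1) = true
  · have hi : (PySem.Str.len ((PySem.Str.split₀ name).getD 1 "") == 1) = true :=
      by
      have h := hcond
      simp only [Bool.and_eq_true] at h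
      exact h.2
    simp only [hcond, if_true]
    rw [foldl_insert_if_eq_getLast_filter, get?_foldl_insert_key]
    rw [show (id_list.filter fun full =>
        decide (2 ≤ (PySem.Str.split₀ full).length)
          && ((PySem.Str.split₀ name).getD 0 "" == (PySem.Str.split₀ full).getLastD "")
          && PySem.Str.startswith ((PySem.Str.split₀ full).getD 0 "")
              ((PySem.Str.split₀ name).getD 1 "")) =
      (id_list.filter fun full =>
        decide (2 ≤ (PySem.Str.split₀ full).length)
          && (((PySem.Str.split₀ full).getLastD "",
              PySem.Str.slice ((PySem.Str.split₀ full).getD 0 "") none (some 1))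
                == ((PySem.Str.split₀ name).getD 0 "", (PySem.Str.split₀ name).getD 1 ""))) from
      List.filter_congr (fun full _ => by
        simpa using pred_eq ((PySem.Str.split₀ name).getD 0 "")
          ((PySem.Str.split₀ name).getD 1 "") full hi)]
    simp only [PySem.Dict.get?_empty]
    cases (id_list.filter _).getLast? <;> simp
  · simp only [hcond, Bool.false_eq_true, if_false]
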